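-- pv_equiv track=rewrite | github.com/Taksh-v/Qual- | intelligence/macro_reasoner.py | summarize_indicators
-- ===== SOURCE A (Python) =====
-- from typing import Any
--
-- def summarize_indicators(indicators: dict[str, Any]) -> str:
--     if not indicators:
--         return "No parsed indicators."
--     priority = [
--         # Policy & rates
--         "fed_funds_rate", "yield_3m", "yield_2y", "yield_10y", "yield_30y",
--         "yield_curve", "yield_curve_10y3m", "term_premium_proxy",
--         # Real rates & inflation
--         "real_rate_proxy", "real_rate_10y", "fed_real_rate",
--         "inflation_cpi", "inflation_core_cpi", "pce_core",
--         "breakeven_5y", "breakeven_10y",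
--         # Credit
--         "credit_hy", "credit_ig", "credit_spread_gap", "ted_spread", "mort_rate_30y",
--         # Markets
--         "sp500", "nasdaq", "vix", "dxy", "gold", "oil_wti", "oil_brent",
--         # Activity
--         "gdp_growth", "unemployment", "pmi_mfg", "initial_claims", "jolts_openings",
--         "us_retail_sales", "us_industrial_prod", "capacity_utilization",
--         "consumer_sentiment", "conf_board_lei",
--         # Money
--         "m2_money_supply", "fed_balance_sheet", "m2_velocity",
--         # FX
--         "eur_usd", "usd_jpy", "usd_inr",
--         # India
--         "nifty50", "sensex", "india_gdp_growth", "india_inflation_cpi",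
--     ]
--     lines = []
--     for key in priority:
--         if key in indicators:
--             lines.append(f"- {key}: {indicators[key]}")
--     for key in sorted(indicators.keys()):
--         if key not in priority:
--             lines.append(f"- {key}: {indicators[key]}")
--     return "\n".join(lines[:45]) if lines else "No parsed indicators."
-- ===== SOURCE B (Python) =====
-- from typing import Any
--
-- def summarize_indicators(indicators: dict[str, Any]) -> str:
--     if not indicators:
--         return "No parsed indicators."
--     priority = [
--         # Policy & rates
--         "fed_funds_rate", "yield_3m", "yield_2y", "yield_10y", "yield_30y",
--         "yield_curve", "yield_curve_10y3m", "term_premium_proxy",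
--         # Real rates & inflation
--         "real_rate_proxy", "real_rate_10y", "fed_real_rate",
--         "inflation_cpi", "inflation_core_cpi", "pce_core",
--         "breakeven_5y", "breakeven_10y",
--         # Credit
--         "credit_hy", "credit_ig", "credit_spread_gap", "ted_spread", "mort_rate_30y",
--         # Markets
--         "sp500", "nasdaq", "vix", "dxy", "gold", "oil_wti", "oil_brent",
--         # Activity
--         "gdp_growth", "unemployment", "pmi_mfg", "initial_claims", "jolts_openings",
--         "us_retail_sales", "us_industrial_prod", "capacity_utilization",
--         "consumer_sentiment", "conf_board_lei",
--         # Money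
--         "m2_money_supply", "fed_balance_sheet", "m2_velocity",
--         # FX
--         "eur_usd", "usd_jpy", "usd_inr",
--         # India
--         "nifty50", "sensex", "india_gdp_growth", "india_inflation_cpi",
--     ]
--     n = len(priority)
--     rank = {k: i for i, k in enumerate(priority)}
--     ordered = sorted(indicators.keys(), key=lambda k: (rank.get(k, n), k))
--     return "\n".join(f"- {k}: {indicators[k]}" for k in ordered[:45])
-- ===== Notes on version B (the rewrite author's own statement) =====
-- stated objective: alternative
-- what changed: A builds the output in two sequential passes (a scan over the 47-entry priority list with a membership test, then a scan over sorted keys filtering out priority ones); B builds a rank dictionary once and produces the whole order with a single sorted() over the keys under the composite key (rank-or-len, key).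
import Mathlib
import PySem

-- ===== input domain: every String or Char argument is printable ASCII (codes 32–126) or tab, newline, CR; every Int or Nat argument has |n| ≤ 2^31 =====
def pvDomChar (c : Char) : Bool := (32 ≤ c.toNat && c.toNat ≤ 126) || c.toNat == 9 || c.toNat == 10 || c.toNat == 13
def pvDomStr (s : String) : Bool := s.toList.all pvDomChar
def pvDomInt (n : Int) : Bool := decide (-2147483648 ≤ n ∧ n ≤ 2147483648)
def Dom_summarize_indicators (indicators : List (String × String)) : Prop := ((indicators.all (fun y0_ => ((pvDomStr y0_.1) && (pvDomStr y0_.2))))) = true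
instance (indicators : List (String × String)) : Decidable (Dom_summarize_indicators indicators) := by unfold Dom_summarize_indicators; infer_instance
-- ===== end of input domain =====

-- B replaces A's two sequential membership-filtered passes (priority scan, then sorted-keys scan) by ONE
-- sorted() over all keys under the composite key (rank-or-len, key); objective: alternative decomposition.

-- the priority table (a module-level literal in both programs)
def pvPriority : List String := [
  "fed_funds_rate", "yield_3m", "yield_2y", "yield_10y", "yield_30y",
  "yield_curve", "yield_curve_10y3m", "term_premium_proxy",
  "real_rate_proxy", "real_rate_10y", "fed_real_rate",
  "inflation_cpi", "inflation_core_cpi", "pce_core",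
  "breakeven_5y", "breakeven_10y",
  "credit_hy", "credit_ig", "credit_spread_gap", "ted_spread", "mort_rate_30y",
  "sp500", "nasdaq", "vix", "dxy", "gold", "oil_wti", "oil_brent",
  "gdp_growth", "unemployment", "pmi_mfg", "initial_claims", "jolts_openings",
  "us_retail_sales", "us_industrial_prod", "capacity_utilization",
  "consumer_sentiment", "conf_board_lei",
  "m2_money_supply", "fed_balance_sheet", "m2_velocity",
  "eur_usd", "usd_jpy", "usd_inr",
  "nifty50", "sensex", "india_gdp_growth", "india_inflation_cpi"]

-- ===== PORT A =====
def summarize_indicators (indicators : List (String × String)) : String :=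
  if indicators = [] then "No parsed indicators."
  else
    let d := PySem.Dict.ofList indicators
    -- for key in priority: if key in indicators: lines.append(f"- {key}: {indicators[key]}")
    let lines := pvPriority.foldl (fun acc key =>
      if d.contains key then acc ++ ["- " ++ key ++ ": " ++ d.getD key ""] else acc) []
    -- for key in sorted(indicators.keys()): if key not in priority: lines.append(...)
    let lines := (PySem.List.sorted d.keys (fun x => x) false).foldl (fun acc key =>
      if !(pvPriority.contains key) then acc ++ ["- " ++ key ++ ": " ++ d.getD key ""] else acc) lines
    if lines ≠ [] then PySem.Str.join "\n" (lines.take 45) else "No parsed indicators."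

-- ===== PORT B =====
def summarize_indicators_alt (indicators : List (String × String)) : String :=
  if indicators = [] then "No parsed indicators."
  else
    let d := PySem.Dict.ofList indicators
    let n : Int := (pvPriority.length : Int)
    -- rank = {k: i for i, k in enumerate(priority)}
    let rank : PySem.Dict String Int :=
      PySem.Dict.ofList ((PySem.List.enumerate pvPriority).map (fun p => (p.2, p.1)))
    -- ordered = sorted(indicators.keys(), key=lambda k: (rank.get(k, n), k))
    let ordered := PySem.List.sorted2 d.keys (fun k => rank.getD k n) (fun k => k) false
    PySem.Str.join "\n" ((ordered.take 45).map (fun k => "- " ++ k ++ ": " ++ d.getD k ""))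

-- ===== PRECONDITION & SPEC =====
def Spec_summarize_indicators (indicators : List (String × String)) (out : String) : Prop := out = summarize_indicators_alt indicators
instance (indicators : List (String × String)) (out : String) : Decidable (Spec_summarize_indicators indicators out) := by unfold Spec_summarize_indicators; infer_instance

-- ===== CLAIM (what is proved, stated in full; the proofs are below) =====
def Claim_equal_summarize_indicators : Prop := ∀ (indicators : List (String × String)), Dom_summarize_indicators indicators → Spec_summarize_indicators indicators (summarize_indicators indicators)

-- ===== LEMMAS AND PROOFS =====

-- proof-side name for B's rank dictionary
def pvRank : PySem.Dict String Int :=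
  PySem.Dict.ofList ((PySem.List.enumerate pvPriority).map (fun p => (p.2, p.1)))

set_option maxHeartbeats 1000000 in
set_option maxRecDepth 100000 in
theorem pvPriority_nodup : pvPriority.Nodup := by decide

set_option maxHeartbeats 2000000 in
set_option maxRecDepth 100000 in
theorem pvRank_keys : pvRank.keys = pvPriority := by decide

set_option maxHeartbeats 2000000 in
set_option maxRecDepth 100000 in
theorem pvRank_pairwise :
    pvPriority.Pairwise (fun a b => pvRank.getD a (pvPriority.length : Int) < pvRank.getD b (pvPriority.length : Int)) := by
  decide

set_option maxHeartbeats 2000000 in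
set_option maxRecDepth 100000 in
theorem pvRank_lt_len : ∀ a ∈ pvPriority, pvRank.getD a (pvPriority.length : Int) < (pvPriority.length : Int) := by decide

theorem pvRank_default {k : String} (hk : k ∉ pvPriority) :
    pvRank.getD k (pvPriority.length : Int) = (pvPriority.length : Int) := by
  apply PySem.Dict.getD_of_not_contains
  rw [PySem.Dict.contains_eq_decide_mem_keys, pvRank_keys]
  simp [hk]

-- Python's tuple sort key (k1 x, k2 x) is the lexicographic order on Int × String
theorem sorted2_eq_sorted_toLex {α : Type} (xs : List α) (k1 : α → Int) (k2 : α → String) :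
    PySem.List.sorted2 xs k1 k2 false
      = PySem.List.sorted xs (fun x => toLex (k1 x, k2 x)) false := by
  have hb : ∀ a b : α, (decide (k1 a < k1 b) || (!decide (k1 b < k1 a) && decide (k2 a < k2 b)))
      = decide (toLex (k1 a, k2 a) < toLex (k1 b, k2 b)) := by
    intro a b
    have h1 : (decide (k1 a < k1 b) || (!decide (k1 b < k1 a) && decide (k2 a < k2 b)))
        = decide (k1 a < k1 b ∨ (k1 a ≤ k1 b ∧ k2 a < k2 b)) := by
      simp [← decide_not, not_lt]
    rw [h1, decide_eq_decide, Prod.Lex.lt_iff]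
    rcases lt_trichotomy (k1 a) (k1 b) with h | h | h
    · simp [h, le_of_lt h]
    · simp [h]
    · simp [lt_asymm h, not_le.mpr h, ne_of_gt h]
  simp only [PySem.List.sorted2, PySem.List.sorted, Bool.false_eq_true, if_false]
  congr 1
  funext acc x
  congr 1
  funext a b
  exact hb a b

-- the heart: B's single sort equals A's two-phase order (priority hits, then sorted leftovers)
set_option maxHeartbeats 2000000 in
set_option maxRecDepth 100000 in
theorem pvOrder (d : PySem.Dict String String) (hnd : d.keys.Nodup) :
    PySem.List.sorted2 d.keys (fun k => pvRank.getD k (pvPriority.length : Int)) (fun k => k) false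
      = pvPriority.filter (fun k => d.contains k)
        ++ (PySem.List.sorted d.keys (fun x => x) false).filter (fun k => !(pvPriority.contains k)) := by
  rw [sorted2_eq_sorted_toLex]
  apply PySem.List.sorted_eq_of_perm_of_pairwise_lt
  · -- permutation of the keys
    have h1 : (pvPriority.filter (fun k => d.contains k)).Perm
        (d.keys.filter (fun k => pvPriority.contains k)) := by
      rw [List.perm_ext_iff_of_nodup (pvPriority_nodup.filter _) (hnd.filter _)]
      intro a
      simp only [List.mem_filter, List.contains_eq_mem, decide_eq_true_eq,
        PySem.Dict.contains_iff_mem_keys]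
      tauto
    have h2 : ((PySem.List.sorted d.keys (fun x => x) false).filter
          (fun k => !(pvPriority.contains k))).Perm
        (d.keys.filter (fun k => !(pvPriority.contains k))) :=
      (PySem.List.sorted_perm d.keys (fun x => x) false).filter _
    exact (h1.append h2).trans (List.filter_append_perm (fun k => pvPriority.contains k) d.keys)
  · -- strict pairwise order under the composite key
    rw [List.pairwise_append]
    refine ⟨?_, ?_, ?_⟩
    · exact List.Pairwise.sublist List.filter_sublist
        (pvRank_pairwise.imp (fun h => Prod.Lex.lt_iff.mpr (Or.inl h)))
    · have hle : (PySem.List.sorted d.keys (fun x => x) false).Pairwise (fun a b => a ≤ b) :=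
        PySem.List.sorted_pairwise d.keys (fun x => x)
      have hnd' : (PySem.List.sorted d.keys (fun x => x) false).Nodup :=
        ((PySem.List.sorted_perm d.keys (fun x => x) false).nodup_iff).mpr hnd
      have hlt : (PySem.List.sorted d.keys (fun x => x) false).Pairwise (fun a b => a < b) :=
        (hle.and hnd').imp (fun h => lt_of_le_of_ne h.1 h.2)
      refine (hlt.filter _).imp_of_mem ?_
      intro a b ha hb h
      have ha' : a ∉ pvPriority := by
        have := (List.mem_filter.mp ha).2; simpa using this
      have hb' : b ∉ pvPriority := by
        have := (List.mem_filter.mp hb).2; simpa using this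
      exact Prod.Lex.lt_iff.mpr (Or.inr ⟨by simp [pvRank_default ha', pvRank_default hb'], h⟩)
    · intro a ha b hb
      have ha' : a ∈ pvPriority := (List.mem_filter.mp ha).1
      have hb' : b ∉ pvPriority := by
        have := (List.mem_filter.mp hb).2; simpa using this
      have hlt : pvRank.getD a (pvPriority.length : Int) < pvRank.getD b (pvPriority.length : Int) := by
        rw [pvRank_default hb']
        exact pvRank_lt_len a ha'
      exact Prod.Lex.lt_iff.mpr (Or.inl hlt)

-- keys of the dict built from the association list = the distinct first components, in order
theorem pvKeys_ofList (ind : List (String × String)) :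
    (PySem.Dict.ofList ind).keys = PySem.Set.ofList (ind.map (·.1)) := by
  rw [show PySem.Dict.ofList ind
      = List.foldl (fun d (p : String × String) => d.insert p.1 p.2) PySem.Dict.empty ind from rfl,
    PySem.Dict.keys_foldl_insert_key ind (·.1) (fun _ p => p.2) PySem.Dict.empty]
  simp [PySem.Set.update_nil_left]

-- ===== VERDICT (by name: the statement is the Claim_ definition above) =====
set_option maxHeartbeats 2000000 in
set_option maxRecDepth 100000 in
theorem summarize_indicators_spec : Claim_equal_summarize_indicators := by
  intro ind _
  unfold Spec_summarize_indicators summarize_indicators summarize_indicators_alt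
  by_cases h : ind = []
  · simp [h]
  · simp only [if_neg h]
    set d := PySem.Dict.ofList ind with hd
    have hnd : d.keys.Nodup := PySem.Dict.nodup_keys_ofList ind
    -- A's two loops are two filtered maps
    rw [PySem.List.foldl_append_if (fun key => d.contains key)
        (fun key => "- " ++ key ++ ": " ++ d.getD key "") pvPriority []]
    rw [PySem.List.foldl_append_if (fun key => !(pvPriority.contains key))
        (fun key => "- " ++ key ++ ": " ++ d.getD key "")]
    rw [List.nil_append, ← List.map_append]
    -- B's single sort is exactly that concatenated key order
    have hrk : PySem.Dict.ofList ((PySem.List.enumerate pvPriority).map (fun p => (p.2, p.1))) = pvRank := rfl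
    rw [hrk, pvOrder d hnd]
    -- keys are nonempty, so A's fallback branch is dead
    have hkey : ∃ k, k ∈ d.keys := by
      rcases List.exists_mem_of_ne_nil ind h with ⟨p, hp⟩
      refine ⟨p.1, ?_⟩
      rw [hd, pvKeys_ofList]
      exact (PySem.Set.mem_ofList _ _).mpr (List.mem_map_of_mem hp)
    have hne : (pvPriority.filter (fun k => d.contains k)
        ++ (PySem.List.sorted d.keys (fun x => x) false).filter
            (fun k => !(pvPriority.contains k))).map
          (fun key => "- " ++ key ++ ": " ++ d.getD key "") ≠ [] := by
      intro hcon
      rcases hkey with ⟨k, hk⟩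
      have hcon' := List.map_eq_nil_iff.mp hcon
      have hmem : k ∈ pvPriority.filter (fun k => d.contains k)
          ++ (PySem.List.sorted d.keys (fun x => x) false).filter
              (fun k => !(pvPriority.contains k)) := by
        by_cases hkp : k ∈ pvPriority
        · refine List.mem_append.mpr (Or.inl (List.mem_filter.mpr ⟨hkp, ?_⟩))
          exact (PySem.Dict.contains_iff_mem_keys d k).mpr hk
        · refine List.mem_append.mpr (Or.inr (List.mem_filter.mpr ⟨?_, ?_⟩))
          · exact (PySem.List.mem_sorted d.keys (fun x => x) false k).mpr hk
          · simp [List.contains_eq_mem, hkp]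
      rw [hcon'] at hmem
      simp at hmem
    rw [if_pos hne, List.map_take]
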